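-- pv_equiv track=rewrite | github.com/clslucas/fboss_cit | rack_tool/rack_diagnostics.py | _build_dsp_temp_matrix
-- ===== SOURCE A (Python) =====
-- def _build_dsp_temp_matrix(dsp_temps):
--     """
--     Organizes the flat DSP temperature data into a 2D matrix for display.
--     Returns a list of lists (rows) representing the temperature matrix.
--     """
--     # The first row defines the starting port for each column.
--     column_starts = [1, 5, 9, 13, 17, 21, 25, 29, 33, 37, 41, 45, 49, 53, 57, 61]
--     matrix = []
--     # There are 4 rows in the physical layout.
--     for row_index in range(4):
--         row_data = []
--         for col_start_port in column_starts:
--             # Calculate the port number for the current cell.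
--             port_num = col_start_port + row_index
--             port_key = f"E{port_num}"
--             temp_val = dsp_temps.get(port_key, "N/A")
--             row_data.append(temp_val)
--         matrix.append(row_data)
--     return matrix
-- ===== SOURCE B (Python) =====
-- def _build_dsp_temp_matrix(dsp_temps):
--     vals = [dsp_temps.get(f"E{p}", "N/A") for p in range(1, 65)]
--     return [vals[r::4] for r in range(4)]
-- ===== Notes on version B (the rewrite author's own statement) =====
-- stated objective: simpler
-- what changed: Replaces the nested per-cell port-number arithmetic over column_starts with a single flat build of the 64 values in port order followed by four stride-4 slices vals[r::4] as the rows.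
import Mathlib
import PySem

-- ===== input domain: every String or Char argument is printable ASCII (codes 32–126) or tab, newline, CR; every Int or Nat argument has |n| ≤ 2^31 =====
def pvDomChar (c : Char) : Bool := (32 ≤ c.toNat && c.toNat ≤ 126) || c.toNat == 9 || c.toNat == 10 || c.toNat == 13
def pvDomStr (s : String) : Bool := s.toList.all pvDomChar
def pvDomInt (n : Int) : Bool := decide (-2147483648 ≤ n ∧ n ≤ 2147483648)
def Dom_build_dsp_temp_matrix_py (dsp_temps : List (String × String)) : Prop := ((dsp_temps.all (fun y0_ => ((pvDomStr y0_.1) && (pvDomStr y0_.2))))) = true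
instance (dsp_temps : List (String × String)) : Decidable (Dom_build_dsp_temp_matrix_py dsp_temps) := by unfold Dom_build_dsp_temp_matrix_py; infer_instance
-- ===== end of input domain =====

-- B builds the 64 values flat in port order and takes the four stride-4 slices vals[r::4] as rows, instead of A's nested per-cell port arithmetic; same cost, simpler shape.


-- ===== PORT A =====
-- dict.get(k, default) on the association list (first match = the dict's entry)
def pvDictGetD (d : List (String × String)) (k : String) (dflt : String) : String :=
  match d.find? (fun p => p.1 == k) with
  | some p => p.2
  | none => dflt

def build_dsp_temp_matrix_py (dsp_temps : List (String × String)) : List (List String) :=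
  let column_starts : List Int := [1, 5, 9, 13, 17, 21, 25, 29, 33, 37, 41, 45, 49, 53, 57, 61]
  (PySem.List.pyRange 0 4 1).foldl (fun matrix row_index =>
    matrix ++ [column_starts.foldl (fun row_data col_start_port =>
      row_data ++ [pvDictGetD dsp_temps ("E" ++ PySem.Int.toStr (col_start_port + row_index)) "N/A"]) []]) []

-- ===== PORT B =====
def build_dsp_temp_matrix_py_alt (dsp_temps : List (String × String)) : List (List String) :=
  let vals := (PySem.List.pyRange 1 65 1).map
    (fun p => pvDictGetD dsp_temps ("E" ++ PySem.Int.toStr p) "N/A")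
  (PySem.List.pyRange 0 4 1).map
    (fun r => (PySem.List.slice? vals (some r) none 4).getD [])

-- ===== PRECONDITION & SPEC =====
def Spec_build_dsp_temp_matrix_py (dsp_temps : List (String × String)) (out : List (List String)) : Prop := out = build_dsp_temp_matrix_py_alt dsp_temps
instance (dsp_temps : List (String × String)) (out : List (List String)) : Decidable (Spec_build_dsp_temp_matrix_py dsp_temps out) := by unfold Spec_build_dsp_temp_matrix_py; infer_instance

-- ===== CLAIM (what is proved, stated in full; the proofs are below) =====
def Claim_equal_build_dsp_temp_matrix_py : Prop := ∀ (dsp_temps : List (String × String)), Dom_build_dsp_temp_matrix_py dsp_temps → Spec_build_dsp_temp_matrix_py dsp_temps (build_dsp_temp_matrix_py dsp_temps)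

-- ===== LEMMAS AND PROOFS =====

-- ===== VERDICT (by name: the statement is the Claim_ definition above) =====
set_option maxHeartbeats 2000000 in
theorem build_dsp_temp_matrix_py_spec : Claim_equal_build_dsp_temp_matrix_py := by
  intro dsp_temps _
  unfold Spec_build_dsp_temp_matrix_py
  have h4 : PySem.List.pyRange 0 4 1 = [0,1,2,3] := by decide
  have h64 : PySem.List.pyRange 1 65 1 = [1,2,3,4,5,6,7,8,9,10,11,12,13,14,15,16,17,18,19,20,21,22,23,24,25,26,27,28,29,30,31,32,33,34,35,36,37,38,39,40,41,42,43,44,45,46,47,48,49,50,51,52,53,54,55,56,57,58,59,60,61,62,63,64] := by decide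
  simp only [build_dsp_temp_matrix_py, build_dsp_temp_matrix_py_alt, h4, h64]
  simp only [List.foldl_cons, List.foldl_nil, List.map_cons, List.map_nil,
    List.nil_append, List.cons_append]
  norm_num [PySem.List.slice?, PySem.List.sliceIndices, PySem.List.clampIdx]
  exact ⟨rfl, rfl, rfl, rfl⟩
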